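-- pv_equiv track=rewrite | github.com/moonstachain/ai-da-guan-jia | scripts/ccswitch_openrouter_bridge.py | strip_duplicate_root_keys
-- ===== SOURCE A (Python) =====
-- def strip_duplicate_root_keys(raw: str, duplicate_keys: set[str]) -> str:
--     if not duplicate_keys:
--         return raw.strip() + ("\n" if raw.strip() else "")
--     kept: list[str] = []
--     current_table: str | None = None
--     for line in raw.splitlines():
--         stripped = line.strip()
--         if stripped.startswith("[") and stripped.endswith("]"):
--             current_table = stripped
--             kept.append(line)
--             continue
--         if current_table is None and "=" in stripped and not stripped.startswith("#"):
--             key = stripped.split("=", 1)[0].strip()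
--             if key in duplicate_keys:
--                 continue
--         kept.append(line)
--     cleaned = "\n".join(kept).strip()
--     return cleaned + ("\n" if cleaned else "")
-- ===== SOURCE B (Python) =====
-- def strip_duplicate_root_keys(raw: str, duplicate_keys: set[str]) -> str:
--     if not duplicate_keys:
--         cleaned = raw.strip()
--         return cleaned + ("\n" if cleaned else "")
--
--     def is_header(line: str) -> bool:
--         s = line.strip()
--         return s.startswith("[") and s.endswith("]")
--
--     def is_dup(line: str) -> bool:
--         s = line.strip()
--         return ("=" in s and not s.startswith("#")
--                 and s.split("=", 1)[0].strip() in duplicate_keys)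
--
--     lines = raw.splitlines()
--     i = 0
--     while i < len(lines) and not is_header(lines[i]):
--         i += 1
--     kept = [l for l in lines[:i] if not is_dup(l)] + lines[i:]
--     cleaned = "\n".join(kept).strip()
--     return cleaned + ("\n" if cleaned else "")
-- ===== Notes on version B (the rewrite author's own statement) =====
-- stated objective: alternative
-- what changed: Replaces A's stateful single loop (a current_table flag threaded through every iteration) by a partition at the first table-header line: filter only the root-section prefix, keep the tail verbatim, then join/strip/normalize as before.
import Mathlib
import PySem

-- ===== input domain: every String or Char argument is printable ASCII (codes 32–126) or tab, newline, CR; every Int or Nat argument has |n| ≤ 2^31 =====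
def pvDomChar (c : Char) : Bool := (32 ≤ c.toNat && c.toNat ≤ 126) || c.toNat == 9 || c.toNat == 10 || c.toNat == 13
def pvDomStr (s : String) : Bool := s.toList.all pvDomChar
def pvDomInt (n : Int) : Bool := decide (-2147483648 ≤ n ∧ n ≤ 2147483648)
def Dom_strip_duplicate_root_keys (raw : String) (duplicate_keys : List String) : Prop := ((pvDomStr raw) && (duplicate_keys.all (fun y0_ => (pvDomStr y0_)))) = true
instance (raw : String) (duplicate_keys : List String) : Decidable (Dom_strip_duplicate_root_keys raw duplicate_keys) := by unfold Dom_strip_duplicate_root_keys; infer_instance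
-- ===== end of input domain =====

-- B replaces A's stateful loop by a split at the first table-header line plus a filter of the prefix (alternative decomposition, same cost).

-- ===== PORT A =====
-- one step of A's loop; state = (kept, current_table)
def pvStepA (duplicate_keys : List String) (st : List String × Option String) (line : String) :
    List String × Option String :=
  let stripped := PySem.Str.strip line
  if PySem.Str.startswith stripped "[" && PySem.Str.endswith stripped "]" then
    (st.1 ++ [line], some stripped)
  else if st.2.isNone && PySem.Str.isIn "=" stripped && !PySem.Str.startswith stripped "#" then
    let key := PySem.Str.strip (((PySem.Str.splitMax? stripped "=" 1).getD []).headD "")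
    if duplicate_keys.contains key then st
    else (st.1 ++ [line], st.2)
  else (st.1 ++ [line], st.2)

def strip_duplicate_root_keys (raw : String) (duplicate_keys : List String) : String :=
  if duplicate_keys.isEmpty then
    (PySem.Str.strip raw) ++ (if PySem.Str.strip raw ≠ "" then "\n" else "")
  else
    let kept := ((PySem.Str.splitlines raw).foldl (pvStepA duplicate_keys) ([], none)).1
    let cleaned := PySem.Str.strip (PySem.Str.join "\n" kept)
    cleaned ++ (if cleaned ≠ "" then "\n" else "")

-- ===== PORT B =====
def pvIsHeader (line : String) : Bool :=
  let s := PySem.Str.strip line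
  PySem.Str.startswith s "[" && PySem.Str.endswith s "]"

def pvIsDup (duplicate_keys : List String) (line : String) : Bool :=
  let s := PySem.Str.strip line
  PySem.Str.isIn "=" s && !PySem.Str.startswith s "#" &&
    duplicate_keys.contains (PySem.Str.strip (((PySem.Str.splitMax? s "=" 1).getD []).headD ""))

def strip_duplicate_root_keys_alt (raw : String) (duplicate_keys : List String) : String :=
  if duplicate_keys.isEmpty then
    let cleaned := PySem.Str.strip raw
    cleaned ++ (if cleaned ≠ "" then "\n" else "")
  else
    let lines := PySem.Str.splitlines raw
    let kept := (lines.takeWhile (fun l => !pvIsHeader l)).filter (fun l => !pvIsDup duplicate_keys l)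
                  ++ lines.dropWhile (fun l => !pvIsHeader l)
    let cleaned := PySem.Str.strip (PySem.Str.join "\n" kept)
    cleaned ++ (if cleaned ≠ "" then "\n" else "")

-- ===== PRECONDITION & SPEC =====
def Spec_strip_duplicate_root_keys (raw : String) (duplicate_keys : List String) (out : String) : Prop := out = strip_duplicate_root_keys_alt raw duplicate_keys
instance (raw : String) (duplicate_keys : List String) (out : String) : Decidable (Spec_strip_duplicate_root_keys raw duplicate_keys out) := by unfold Spec_strip_duplicate_root_keys; infer_instance

-- ===== CLAIM (what is proved, stated in full; the proofs are below) =====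
def Claim_equal_strip_duplicate_root_keys : Prop := ∀ (raw : String) (duplicate_keys : List String), Dom_strip_duplicate_root_keys raw duplicate_keys → Spec_strip_duplicate_root_keys raw duplicate_keys (strip_duplicate_root_keys raw duplicate_keys)

-- ===== LEMMAS AND PROOFS =====

-- once current_table is set, A's loop keeps every remaining line
theorem foldA_some (dk : List String) (lines : List String) :
    ∀ (kept : List String) (t : String),
      (lines.foldl (pvStepA dk) (kept, some t)).1 = kept ++ lines := by
  induction lines with
  | nil => intro kept t; simp
  | cons l rest ih =>
    intro kept t
    simp only [List.foldl_cons, pvStepA]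
    split
    · rw [ih]; simp
    · rw [if_neg (by simp), ih]; simp

-- before the first header, A filters; from the first header on, it keeps everything
theorem foldA_none (dk : List String) (lines : List String) :
    ∀ (kept : List String),
      (lines.foldl (pvStepA dk) (kept, none)).1 =
        kept ++ (lines.takeWhile (fun l => !pvIsHeader l)).filter (fun l => !pvIsDup dk l)
             ++ lines.dropWhile (fun l => !pvIsHeader l) := by
  induction lines with
  | nil => intro kept; simp
  | cons l rest ih =>
    intro kept
    simp only [List.foldl_cons]
    by_cases hh : pvIsHeader l = true
    · have hstep : pvStepA dk (kept, none) l = (kept ++ [l], some (PySem.Str.strip l)) := by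
        simp only [pvStepA]
        rw [if_pos (by simpa [pvIsHeader] using hh)]
      rw [hstep, foldA_some]
      simp [hh]
    · have hh' : (PySem.Str.startswith (PySem.Str.strip l) "[" &&
          PySem.Str.endswith (PySem.Str.strip l) "]") = false := by
        simpa [pvIsHeader] using hh
      by_cases hd : pvIsDup dk l = true
      · have hstep : pvStepA dk (kept, none) l = (kept, none) := by
          simp only [pvStepA, hh']
          simp only [pvIsDup] at hd
          simp only [Bool.and_assoc] at hd
          rw [if_neg (by simp)]
          rw [if_pos (by simp_all)]
          rw [if_pos (by simp_all)]
        rw [hstep, ih]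
        simp [hh, hd]
      · have hstep : pvStepA dk (kept, none) l = (kept ++ [l], none) := by
          simp only [pvStepA, hh']
          simp only [pvIsDup, Bool.and_assoc] at hd
          rw [if_neg (by simp)]
          split
          · rw [if_neg (by simp_all)]
          · rfl
        rw [hstep, ih]
        simp [hh, hd]

-- ===== VERDICT (by name: the statement is the Claim_ definition above) =====
theorem strip_duplicate_root_keys_spec : Claim_equal_strip_duplicate_root_keys := by
  intro raw dk _
  unfold Spec_strip_duplicate_root_keys strip_duplicate_root_keys strip_duplicate_root_keys_alt
  by_cases h : dk.isEmpty
  · simp [h]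
  · simp only [h, if_false, Bool.false_eq_true]
    rw [foldA_none]
    simp
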